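-- pv_equiv track=rewrite | github.com/ErickMwazonga/sifu | strings/has_unique_chars.py | is_unique_v3
-- ===== SOURCE A (Python) =====
-- def is_unique_v3(_input: str) -> bool:
--     alpha = 'abcdefghijklmnopqrstuvwxyz'
--
--     for i in _input:
--         if i in alpha:
--             alpha = alpha.replace(i, '')
--         else:
--             return False
--     return True
-- ===== SOURCE B (Python) =====
-- def is_unique_v3(_input: str) -> bool:
--     s_set = set(_input)
--     return s_set <= set('abcdefghijklmnopqrstuvwxyz') and len(s_set) == len(_input)
-- ===== Notes on version B (the rewrite author's own statement) =====
-- stated objective: simpler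
-- what changed: Replaces A's single-pass loop that mutates a shrinking alphabet string (early return on a repeated or non-lowercase char) with two aggregate set operations: set(_input) must be a subset of the lowercase alphabet and its size must equal len(_input).
import Mathlib
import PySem

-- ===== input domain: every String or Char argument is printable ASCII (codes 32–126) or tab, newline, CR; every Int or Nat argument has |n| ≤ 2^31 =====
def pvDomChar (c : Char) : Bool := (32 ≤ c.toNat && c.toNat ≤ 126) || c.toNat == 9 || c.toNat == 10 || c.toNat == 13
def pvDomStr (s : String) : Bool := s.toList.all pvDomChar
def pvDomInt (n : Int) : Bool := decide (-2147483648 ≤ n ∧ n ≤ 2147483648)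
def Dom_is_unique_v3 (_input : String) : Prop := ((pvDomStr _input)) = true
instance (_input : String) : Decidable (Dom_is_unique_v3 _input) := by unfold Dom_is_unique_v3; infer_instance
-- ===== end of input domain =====

-- B replaces A's mutating shrink-the-alphabet loop with two aggregate set checks
-- (subset of the alphabet, and set size = string length); objective: simpler.

-- ===== PORT A =====
-- The loop over _input with the shrinking string `alpha`.
-- `i in alpha` for a single char i is exactly char membership (alpha.contains i);
-- `alpha.replace(i, '')` for a single-char old and empty new is exactly dropping
-- every occurrence of i (List.filter) — both ported by hand, exact on all inputs.
def isUniqueV3Go (chars alpha : List Char) : Bool :=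
  match chars with
  | [] => true
  | i :: rest =>
      if alpha.contains i then isUniqueV3Go rest (alpha.filter (fun c => !(c == i)))
      else false

def is_unique_v3 (_input : String) : Bool :=
  isUniqueV3Go _input.toList "abcdefghijklmnopqrstuvwxyz".toList

-- ===== PORT B =====
def is_unique_v3_alt (_input : String) : Bool :=
  let s_set := PySem.Set.ofList _input.toList
  PySem.Set.issubset s_set (PySem.Set.ofList "abcdefghijklmnopqrstuvwxyz".toList)
    && (PySem.Set.len s_set == PySem.Str.len _input)

-- ===== PRECONDITION & SPEC =====
def Spec_is_unique_v3 (_input : String) (out : Bool) : Prop := out = is_unique_v3_alt _input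
instance (_input : String) (out : Bool) : Decidable (Spec_is_unique_v3 _input out) := by unfold Spec_is_unique_v3; infer_instance

-- ===== CLAIM (what is proved, stated in full; the proofs are below) =====
def Claim_equal_is_unique_v3 : Prop := ∀ (_input : String), Dom_is_unique_v3 _input → Spec_is_unique_v3 _input (is_unique_v3 _input)

-- ===== LEMMAS AND PROOFS =====

-- A's loop, characterised: true iff the chars are pairwise distinct and all in alpha.
theorem isUniqueV3Go_eq (chars : List Char) : ∀ (alpha : List Char),
    isUniqueV3Go chars alpha
      = (decide chars.Nodup && chars.all (fun c => alpha.contains c)) := by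
  induction chars with
  | nil => intro alpha; simp [isUniqueV3Go]
  | cons i rest ih =>
      intro alpha
      by_cases h : i ∈ alpha
      · rw [isUniqueV3Go, if_pos (by simpa using h), ih]
        rw [Bool.eq_iff_iff]
        simp only [Bool.and_eq_true, decide_eq_true_eq, List.all_eq_true,
          List.mem_filter, List.contains_eq_mem, List.nodup_cons,
          Bool.not_eq_eq_eq_not, Bool.not_true, beq_eq_false_iff_ne]
        constructor
        · rintro ⟨hn, hall⟩
          refine ⟨⟨fun hi => ((hall i hi).2 rfl), hn⟩, ?_⟩
          intro c hc
          rcases List.mem_cons.mp hc with rfl | hc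
          · exact h
          · exact (by simpa using (hall c hc).1)
        · rintro ⟨⟨hirest, hn⟩, hall⟩
          refine ⟨hn, fun c hc => ⟨by simpa using hall c (.tail _ hc), ?_⟩⟩
          rintro rfl; exact hirest hc
      · rw [isUniqueV3Go, if_neg (by simpa using h)]
        simp [List.all_cons, List.contains_eq_mem, h]

-- set(xs) has as many elements as xs iff xs has no duplicates.
theorem length_ofList_eq_iff_nodup (xs : List Char) :
    (PySem.Set.ofList xs).length = xs.length ↔ xs.Nodup := by
  induction xs with
  | nil => simp [PySem.Set.ofList]
  | cons x xs ih =>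
      rw [PySem.Set.ofList_cons]
      by_cases h : x ∈ xs
      · have hmem : x ∈ PySem.Set.ofList xs := (PySem.Set.mem_ofList _ _).mpr h
        have hlt : ((PySem.Set.ofList xs).discard x).length < (PySem.Set.ofList xs).length := by
          unfold PySem.Set.discard
          refine List.length_filter_lt_length_iff_exists.mpr ⟨x, hmem, by simp⟩
        have hle := PySem.Set.length_ofList_le xs
        constructor
        · intro hlen; simp at hlen; omega
        · intro hn; exact absurd h (by simp [List.nodup_cons] at hn; exact hn.1)
      · have hdisc : (PySem.Set.ofList xs).discard x = PySem.Set.ofList xs := by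
          unfold PySem.Set.discard
          refine List.filter_eq_self.mpr ?_
          intro a ha
          have : a ∈ xs := (PySem.Set.mem_ofList _ _).mp ha
          simp; rintro rfl; exact h this
        rw [hdisc]
        simp [List.nodup_cons, h, ih]

-- B, characterised the same way.
theorem is_unique_v3_alt_eq (s : String) :
    is_unique_v3_alt s
      = (decide s.toList.Nodup
          && s.toList.all (fun c => ("abcdefghijklmnopqrstuvwxyz".toList).contains c)) := by
  rw [is_unique_v3_alt, Bool.eq_iff_iff]
  simp only [Bool.and_eq_true, PySem.Set.issubset_iff, PySem.Set.mem_ofList,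
    PySem.Set.len, PySem.Str.len, beq_iff_eq, Nat.cast_inj, decide_eq_true_eq,
    List.all_eq_true, List.contains_eq_mem]
  constructor
  · rintro ⟨hsub, hlen⟩
    refine ⟨(length_ofList_eq_iff_nodup _).mp hlen, fun c hc => ?_⟩
    simpa using hsub c hc
  · rintro ⟨hn, hall⟩
    refine ⟨fun c hc => by simpa using hall c hc,
      (length_ofList_eq_iff_nodup _).mpr hn⟩

-- ===== VERDICT (by name: the statement is the Claim_ definition above) =====
theorem is_unique_v3_spec : Claim_equal_is_unique_v3 := by
  intro s _
  unfold Spec_is_unique_v3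
  rw [is_unique_v3, isUniqueV3Go_eq, is_unique_v3_alt_eq]
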